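-- pv_equiv track=rewrite | github.com/nukiduki/lyric-information-retrieval | src/information_retrieval/vector_space_model.py | order_matrix
-- ===== SOURCE A (Python) =====
-- from typing import Dict, List, Set, Tuple
--
-- def order_matrix(matrix: List[Tuple[str, int]]):
--     """Orders matrix and adds weight calculation"""
--     weight_matrix: Dict[str, Dict[int]] = {}
--
--     matrix.sort(key=lambda x: x[0])
--
--     # inverting and counting how often words appear
--     for word, index in matrix:
--         if word not in weight_matrix:
--             weight_matrix[word] = {index: 1}
--         else:
--             weight_matrix[word][index] = weight_matrix[word].get(index, 0) + 1
--
--     return weight_matrix  # word: {doc1: number of appearances, doc2: number of appearances, ...}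
-- ===== SOURCE B (Python) =====
-- def order_matrix(matrix):
--     """Orders matrix and adds weight calculation"""
--     matrix.sort(key=lambda x: x[0])
--     weight_matrix = {}
--     for word in sorted({w for w, _ in matrix}):
--         indices = [i for w, i in matrix if w == word]
--         weight_matrix[word] = {i: indices.count(i) for i in dict.fromkeys(indices)}
--     return weight_matrix
-- ===== Notes on version B (the rewrite author's own statement) =====
-- stated objective: alternative
-- what changed: A makes one accumulating pass over the sorted list, branching on whether the word's dict entry exists and incrementing counts in place; B first extracts the sorted set of distinct words and then, for each word, rescans the list to collect that word's indices and builds the inner dict from first occurrences with list.count (distinct-word outer loop with per-word scan-and-count instead of a single keyed accumulation pass).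
import Mathlib
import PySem

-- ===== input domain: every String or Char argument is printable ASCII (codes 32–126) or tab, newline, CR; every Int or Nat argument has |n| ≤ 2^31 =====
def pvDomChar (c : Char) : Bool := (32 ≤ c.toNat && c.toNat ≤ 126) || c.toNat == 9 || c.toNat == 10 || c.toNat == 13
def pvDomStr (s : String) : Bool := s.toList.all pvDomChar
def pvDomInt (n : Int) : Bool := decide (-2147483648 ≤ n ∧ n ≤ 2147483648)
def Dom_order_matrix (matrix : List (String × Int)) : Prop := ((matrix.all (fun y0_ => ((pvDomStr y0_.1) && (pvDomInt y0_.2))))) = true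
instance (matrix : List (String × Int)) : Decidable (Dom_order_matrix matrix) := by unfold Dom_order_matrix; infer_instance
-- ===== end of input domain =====

-- B replaces A's single accumulating dict pass by an outer loop over the sorted distinct words with
-- a per-word rescan and list.count (alternative decomposition, same result, not faster). Both
-- Pythons sort `matrix` in place; the equivalence proved here is about the RETURN value (the
-- mutation is identical in A and B).

-- ===== PORT A =====
-- one step of A's loop body: `if word not in wm: wm[word] = {index: 1} else: wm[word][index] = wm[word].get(index, 0) + 1`
def pvStepA (wm : PySem.Dict String (PySem.Dict Int Int)) (p : String × Int) :
    PySem.Dict String (PySem.Dict Int Int) :=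
  if wm.contains p.1 = false then
    wm.insert p.1 (PySem.Dict.ofList [(p.2, (1 : Int))])
  else
    -- wm[word][index] = wm[word].get(index, 0) + 1  (key p.1 is present, so the default is unused)
    wm.modify p.1 PySem.Dict.empty (fun inner => inner.insert p.2 (inner.getD p.2 0 + 1))

def order_matrix (matrix : List (String × Int)) : List (String × List (Int × Int)) :=
  let m2 := PySem.List.sorted matrix (fun x => x.1)
  ((m2.foldl pvStepA PySem.Dict.empty).items).map (fun q => (q.1, q.2.items))

-- ===== PORT B =====
-- `indices = [i for w, i in matrix if w == word]; {i: indices.count(i) for i in dict.fromkeys(indices)}`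
def pvInnerB (m2 : List (String × Int)) (word : String) : PySem.Dict Int Int :=
  let indices := (m2.filter (fun p => p.1 == word)).map Prod.snd
  (PySem.List.dedup indices).foldl
    (fun d i => d.insert i (PySem.List.count indices i)) PySem.Dict.empty

def order_matrix_alt (matrix : List (String × Int)) : List (String × List (Int × Int)) :=
  let m2 := PySem.List.sorted matrix (fun x => x.1)
  let words := PySem.List.sorted (PySem.Set.ofList (m2.map Prod.fst)) (fun x => x)
  ((words.foldl (fun wm w => wm.insert w (pvInnerB m2 w)) PySem.Dict.empty).items).map
    (fun q => (q.1, q.2.items))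

-- ===== PRECONDITION & SPEC =====
def Spec_order_matrix (matrix : List (String × Int)) (out : List (String × List (Int × Int))) : Prop := out = order_matrix_alt matrix
instance (matrix : List (String × Int)) (out : List (String × List (Int × Int))) : Decidable (Spec_order_matrix matrix out) := by unfold Spec_order_matrix; infer_instance

-- ===== CLAIM (what is proved, stated in full; the proofs are below) =====
def Claim_equal_order_matrix : Prop := ∀ (matrix : List (String × Int)), Dom_order_matrix matrix → Spec_order_matrix matrix (order_matrix matrix)

-- ===== LEMMAS AND PROOFS =====

-- proof-side grouping of a key-sorted list into runs: (key, list of second components of the run)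
def pvGroupby : List (String × Int) → List (String × List Int)
  | [] => []
  | (w, i) :: rest =>
    (w, i :: (rest.takeWhile (fun q => q.1 == w)).map Prod.snd)
      :: pvGroupby (rest.dropWhile (fun q => q.1 == w))
termination_by l => l.length
decreasing_by
  simpa using Nat.lt_succ_of_le (List.length_dropWhile_le _ _)

-- A's loop over one run of pairs all keyed w, starting from a dict where w was just inserted,
-- only rewrites the entry at w with the inner counting fold.
theorem pv_fold_group (w : String) (g : List Int) :
    ∀ (wm : PySem.Dict String (PySem.Dict Int Int)) (inner : PySem.Dict Int Int),
    (g.map (fun j => (w, j))).foldl pvStepA (wm.insert w inner)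
      = wm.insert w (g.foldl (fun d j => d.insert j (d.getD j 0 + 1)) inner) := by
  induction g with
  | nil => intro wm inner; rfl
  | cons j t ih =>
    intro wm inner
    have hc : (wm.insert w inner).contains w = true := PySem.Dict.contains_insert_self _ _ _
    simp only [List.map_cons, List.foldl_cons]
    have hstep : pvStepA (wm.insert w inner) (w, j)
        = wm.insert w (inner.insert j (inner.getD j 0 + 1)) := by
      simp [pvStepA, hc, PySem.Dict.modify, PySem.Dict.getD_insert_self,
        PySem.Dict.insert_insert_self]
    rw [hstep, ih]

-- keys in the dropped suffix are never the run's key w (uses sortedness of the tail)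
theorem pv_dropWhile_key_ne (w : String) :
    ∀ (rest : List (String × Int)),
    rest.Pairwise (fun a b => a.1 ≤ b.1) → (∀ q ∈ rest, w ≤ q.1) →
    ∀ p ∈ rest.dropWhile (fun q => q.1 == w), p.1 ≠ w := by
  intro rest
  induction rest with
  | nil => intro _ _ p hp; simp [List.dropWhile] at hp
  | cons q t ih =>
    intro hpw hle p hp
    by_cases hq : q.1 = w
    · rw [List.dropWhile_cons_of_pos (by simp [hq])] at hp
      exact ih hpw.tail (fun r hr => hle r (List.mem_cons_of_mem _ hr)) p hp
    · rw [List.dropWhile_cons_of_neg (by simp [hq])] at hp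
      have hwq : w < q.1 := lt_of_le_of_ne (hle q (List.mem_cons_self)) (Ne.symm hq)
      rcases List.mem_cons.mp hp with h | h
      · exact h ▸ hq
      · have : q.1 ≤ p.1 := (List.pairwise_cons.mp hpw).1 p h
        exact fun hpw' => absurd (hpw' ▸ this) (not_le.mpr hwq)

-- main invariant for A: on a list sorted by key whose keys are all fresh for wm,
-- A's fold appends exactly the groups (as counters) to wm's items.
theorem pv_fold_main :
    ∀ (l : List (String × Int)), l.Pairwise (fun a b => a.1 ≤ b.1) →
    ∀ (wm : PySem.Dict String (PySem.Dict Int Int)), (∀ p ∈ l, wm.contains p.1 = false) →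
    l.foldl pvStepA wm
      = PySem.Dict.mk (wm.items ++ (pvGroupby l).map (fun g => (g.1, PySem.Dict.counter g.2))) := by
  intro l
  induction l using pvGroupby.induct with
  | case1 => intro _ wm _; simp [pvGroupby]
  | case2 w i rest ih =>
    intro hpw wm hfresh
    have hwle : ∀ q ∈ rest, w ≤ q.1 := fun q hq => (List.pairwise_cons.mp hpw).1 q hq
    have hpt : rest.Pairwise (fun a b => a.1 ≤ b.1) := hpw.tail
    set g := rest.takeWhile (fun q => q.1 == w) with hg
    set r := rest.dropWhile (fun q => q.1 == w) with hr
    have hsplit : rest = g ++ r := (List.takeWhile_append_dropWhile).symm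
    have hgkeys : ∀ q ∈ g, q.1 = w := by
      intro q hq
      have := List.mem_takeWhile_imp hq
      simpa using this
    have hgmap : g = (g.map Prod.snd).map (fun j => (w, j)) := by
      rw [List.map_map]
      conv_lhs => rw [← List.map_id g]
      exact List.map_congr_left fun q hq => by
        simp [Prod.ext_iff, hgkeys q hq]
    have hcw : wm.contains w = false := hfresh (w, i) (List.mem_cons_self)
    have hstep1 : pvStepA wm (w, i) = wm.insert w (PySem.Dict.ofList [(i, (1 : Int))]) := by
      simp [pvStepA, hcw]
    have hrun : g.foldl pvStepA (wm.insert w (PySem.Dict.ofList [(i, (1 : Int))]))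
        = wm.insert w (PySem.Dict.counter (i :: g.map Prod.snd)) := by
      conv_lhs => rw [hgmap]
      rw [pv_fold_group]
      congr 1
    have happend : wm.insert w (PySem.Dict.counter (i :: g.map Prod.snd))
        = PySem.Dict.mk (wm.items ++ [(w, PySem.Dict.counter (i :: g.map Prod.snd))]) := by
      simp [PySem.Dict.insert, hcw]
    have hrpw : r.Pairwise (fun a b => a.1 ≤ b.1) :=
      hpt.sublist (List.dropWhile_sublist _)
    have hrne : ∀ p ∈ r, p.1 ≠ w := pv_dropWhile_key_ne w rest hpt hwle
    have hrfresh : ∀ p ∈ r,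
        (PySem.Dict.mk (wm.items ++ [(w, PySem.Dict.counter (i :: g.map Prod.snd))])).contains p.1
          = false := by
      intro p hp
      have h1 : wm.contains p.1 = false :=
        hfresh p (List.mem_cons_of_mem _ (hsplit ▸ List.mem_append_right g hp))
      have h2 : p.1 ≠ w := hrne p hp
      have h2' : w ≠ p.1 := Ne.symm h2
      simp only [PySem.Dict.contains] at h1 ⊢
      simp [List.any_append, h1, h2']
    rw [List.foldl_cons, hstep1]
    conv_lhs => rw [hsplit]
    rw [List.foldl_append, hrun, happend, ih hrpw _ hrfresh]
    simp only [pvGroupby, ← hg, ← hr, List.map_cons]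
    simp [List.append_assoc]

-- the keys of the groups are exactly the keys of the list (as sets)
theorem pv_mem_groupby_keys :
    ∀ (l : List (String × Int)), l.Pairwise (fun a b => a.1 ≤ b.1) →
    ∀ x, x ∈ (pvGroupby l).map Prod.fst ↔ x ∈ l.map Prod.fst := by
  intro l
  induction l using pvGroupby.induct with
  | case1 => intro _ x; simp [pvGroupby]
  | case2 w i rest ih =>
    intro hpw x
    have hpt : rest.Pairwise (fun a b => a.1 ≤ b.1) := hpw.tail
    set g := rest.takeWhile (fun q => q.1 == w) with hg
    set r := rest.dropWhile (fun q => q.1 == w) with hr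
    have hsplit : rest = g ++ r := (List.takeWhile_append_dropWhile).symm
    have hgkeys : ∀ q ∈ g, q.1 = w := by
      intro q hq
      have := List.mem_takeWhile_imp hq
      simpa using this
    have hrpw : r.Pairwise (fun a b => a.1 ≤ b.1) := hpt.sublist (List.dropWhile_sublist _)
    constructor
    · intro hx
      simp only [pvGroupby, ← hg, ← hr, List.map_cons, List.mem_cons] at hx
      rcases hx with h | h
      · exact h ▸ (by simp)
      · have := (ih hrpw x).mp h
        have hxr : x ∈ r.map Prod.fst := this
        rcases List.mem_map.mp hxr with ⟨p, hp, hpe⟩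
        exact List.mem_map.mpr ⟨p, List.mem_cons_of_mem _ (hsplit ▸ List.mem_append_right g hp), hpe⟩
    · intro hx
      simp only [pvGroupby, ← hg, ← hr, List.map_cons, List.mem_cons]
      rcases List.mem_map.mp hx with ⟨p, hp, hpe⟩
      rcases List.mem_cons.mp hp with h | h
      · left; rw [← hpe, h]
      · rcases List.mem_append.mp (hsplit ▸ h) with h' | h'
        · left; rw [← hpe, hgkeys p h']
        · right; exact (ih hrpw x).mpr (List.mem_map.mpr ⟨p, h', hpe⟩)

-- the group keys are strictly increasing
theorem pv_groupby_keys_lt :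
    ∀ (l : List (String × Int)), l.Pairwise (fun a b => a.1 ≤ b.1) →
    ((pvGroupby l).map Prod.fst).Pairwise (· < ·) := by
  intro l
  induction l using pvGroupby.induct with
  | case1 => intro _; simp [pvGroupby]
  | case2 w i rest ih =>
    intro hpw
    have hpt : rest.Pairwise (fun a b => a.1 ≤ b.1) := hpw.tail
    have hwle : ∀ q ∈ rest, w ≤ q.1 := fun q hq => (List.pairwise_cons.mp hpw).1 q hq
    set g := rest.takeWhile (fun q => q.1 == w) with hg
    set r := rest.dropWhile (fun q => q.1 == w) with hr
    have hrpw : r.Pairwise (fun a b => a.1 ≤ b.1) := hpt.sublist (List.dropWhile_sublist _)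
    have hrne : ∀ p ∈ r, p.1 ≠ w := pv_dropWhile_key_ne w rest hpt hwle
    simp only [pvGroupby, ← hg, ← hr, List.map_cons, List.pairwise_cons]
    refine ⟨?_, ih hrpw⟩
    intro x hx
    have hxr : x ∈ r.map Prod.fst := (pv_mem_groupby_keys r hrpw x).mp hx
    rcases List.mem_map.mp hxr with ⟨p, hp, hpe⟩
    have h1 : w ≤ p.1 := hwle p (by rw [hr] at hp; exact (List.dropWhile_sublist _).mem hp)
    have h2 : p.1 ≠ w := hrne p hp
    exact hpe ▸ lt_of_le_of_ne h1 (Ne.symm h2)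

-- each group's contents are exactly the filtered second components
theorem pv_groupby_filter :
    ∀ (l : List (String × Int)), l.Pairwise (fun a b => a.1 ≤ b.1) →
    ∀ gr ∈ pvGroupby l, (l.filter (fun p => p.1 == gr.1)).map Prod.snd = gr.2 := by
  intro l
  induction l using pvGroupby.induct with
  | case1 => intro _ gr hgr; simp [pvGroupby] at hgr
  | case2 w i rest ih =>
    intro hpw gr hgr
    have hpt : rest.Pairwise (fun a b => a.1 ≤ b.1) := hpw.tail
    have hwle : ∀ q ∈ rest, w ≤ q.1 := fun q hq => (List.pairwise_cons.mp hpw).1 q hq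
    set g := rest.takeWhile (fun q => q.1 == w) with hg
    set r := rest.dropWhile (fun q => q.1 == w) with hr
    have hsplit : rest = g ++ r := (List.takeWhile_append_dropWhile).symm
    have hgkeys : ∀ q ∈ g, q.1 = w := by
      intro q hq
      have := List.mem_takeWhile_imp hq
      simpa using this
    have hrpw : r.Pairwise (fun a b => a.1 ≤ b.1) := hpt.sublist (List.dropWhile_sublist _)
    have hrne : ∀ p ∈ r, p.1 ≠ w := pv_dropWhile_key_ne w rest hpt hwle
    simp only [pvGroupby, ← hg, ← hr, List.mem_cons] at hgr
    rcases hgr with h | h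
    · subst h
      simp only
      conv_lhs => rw [hsplit]
      rw [show ((w, i) :: (g ++ r) : List (String × Int)) = ((w, i) :: g) ++ r from rfl,
        List.filter_append]
      have hf1 : ((w, i) :: g).filter (fun p => p.1 == w) = (w, i) :: g := by
        rw [List.filter_eq_self]
        intro p hp
        rcases List.mem_cons.mp hp with h' | h'
        · simp [h']
        · simp [hgkeys p h']
      have hf2 : r.filter (fun p => p.1 == w) = [] := by
        rw [List.filter_eq_nil_iff]
        intro p hp
        simp [hrne p hp]
      rw [hf1, hf2]
      simp
    · have hne : gr.1 ≠ w := by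
        have hx : gr.1 ∈ (pvGroupby r).map Prod.fst := List.mem_map.mpr ⟨gr, h, rfl⟩
        have hxr : gr.1 ∈ r.map Prod.fst := (pv_mem_groupby_keys r hrpw gr.1).mp hx
        rcases List.mem_map.mp hxr with ⟨p, hp, hpe⟩
        exact hpe ▸ hrne p hp
      have hf0 : ((w, i) :: rest).filter (fun p => p.1 == gr.1)
          = r.filter (fun p => p.1 == gr.1) := by
        conv_lhs => rw [hsplit]
        rw [show ((w, i) :: (g ++ r) : List (String × Int)) = ((w, i) :: g) ++ r from rfl,
          List.filter_append]
        have hf1 : ((w, i) :: g).filter (fun p => p.1 == gr.1) = [] := by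
          rw [List.filter_eq_nil_iff]
          intro p hp
          rcases List.mem_cons.mp hp with h' | h'
          · simp [h', Ne.symm hne]
          · simp [hgkeys p h', Ne.symm hne]
        rw [hf1]; simp
      rw [hf0]
      exact ih hrpw gr h

-- B's word list is exactly the group keys
theorem pv_words_eq (l : List (String × Int)) (hpw : l.Pairwise (fun a b => a.1 ≤ b.1)) :
    PySem.List.sorted (PySem.Set.ofList (l.map Prod.fst)) (fun x => x) false
      = (pvGroupby l).map Prod.fst := by
  apply PySem.List.sorted_eq_of_perm_of_pairwise_lt
  · apply (List.perm_ext_iff_of_nodup ?_ ?_).mpr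
    · intro x
      rw [pv_mem_groupby_keys l hpw x]
      exact (PySem.Set.mem_ofList _ _).symm
    · exact List.Pairwise.imp ne_of_lt (pv_groupby_keys_lt l hpw)
    · exact PySem.Set.nodup_ofList _
  · exact pv_groupby_keys_lt l hpw

-- ===== VERDICT (by name: the statement is the Claim_ definition above) =====
theorem order_matrix_spec : Claim_equal_order_matrix := by
  intro matrix _
  unfold Spec_order_matrix order_matrix order_matrix_alt
  dsimp only
  have hpw : (PySem.List.sorted matrix (fun x => x.1) false).Pairwise (fun a b => a.1 ≤ b.1) :=
    PySem.List.sorted_pairwise matrix (fun x => x.1)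
  set m2 := PySem.List.sorted matrix (fun x => x.1) false with hm2
  -- A's side: the fold is the groups as counters
  rw [pv_fold_main m2 hpw PySem.Dict.empty (fun p _ => PySem.Dict.contains_empty p.1)]
  -- B's side: the outer fold over the distinct words appends fresh keys
  rw [pv_words_eq m2 hpw]
  have hnd : (((pvGroupby m2).map Prod.fst).map id).Nodup := by
    rw [List.map_id]
    exact List.Pairwise.imp ne_of_lt (pv_groupby_keys_lt m2 hpw)
  rw [show ((pvGroupby m2).map Prod.fst).foldl
        (fun wm w => wm.insert w (pvInnerB m2 w)) PySem.Dict.empty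
      = ((pvGroupby m2).map Prod.fst).foldl
        (fun wm w => wm.insert (id w) (pvInnerB m2 w)) PySem.Dict.empty from rfl]
  rw [PySem.Dict.items_foldl_insert_fresh _ _ _ _
    (fun a _ => PySem.Dict.contains_empty (id a)) hnd]
  simp only [PySem.Dict.empty, List.nil_append, List.map_map, id]
  apply List.map_congr_left
  intro gr hgr
  simp only [Function.comp]
  congr 1
  -- inner dicts agree: B's dedup/count build vs Counter of the group
  have hfil := pv_groupby_filter m2 hpw gr hgr
  have hndi : ((PySem.List.dedup gr.2).map id).Nodup := by
    rw [List.map_id]; exact PySem.List.nodup_dedup gr.2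
  have hinner : pvInnerB m2 gr.1
      = (PySem.List.dedup gr.2).foldl
          (fun d i => d.insert (id i) ((PySem.List.count gr.2 i : Nat) : Int))
          PySem.Dict.empty := by
    unfold pvInnerB
    simp only [hfil, id]
  rw [hinner,
    PySem.Dict.items_foldl_insert_fresh _ _ _ _
      (fun a _ => PySem.Dict.contains_empty (id a)) hndi,
    PySem.Dict.items_counter]
  simp [PySem.List.dedup_eq_ofList, PySem.List.count_eq, id]
  rfl
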